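-- pv_equiv track=rewrite | github.com/GIS-DHSIT/Adaptron | adaptron/validate/comparator.py | compute_wins
-- ===== SOURCE A (Python) =====
-- def compute_wins(
--
--     baseline_preds: list[str],
--     finetuned_preds: list[str],
--     references: list[str],
-- ) -> tuple[int, int, int]:
--     """Return (wins, losses, ties) for finetuned vs baseline."""
--     wins = losses = ties = 0
--     for bp, fp, ref in zip(baseline_preds, finetuned_preds, references):
--         b_correct = bp.strip().lower() == ref.strip().lower()
--         f_correct = fp.strip().lower() == ref.strip().lower()
--         if f_correct and not b_correct:
--             wins += 1
--         elif b_correct and not f_correct: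
--             losses += 1
--         else:
--             ties += 1
--     return wins, losses, ties
-- ===== SOURCE B (Python) =====
-- def compute_wins(
--     baseline_preds: list[str],
--     finetuned_preds: list[str],
--     references: list[str],
-- ) -> tuple[int, int, int]:
--     """Return (wins, losses, ties) by inclusion-exclusion over correctness counts."""
--     n = min(len(baseline_preds), len(finetuned_preds), len(references))
--     bn = [s.strip().lower() for s in baseline_preds[:n]]
--     fn = [s.strip().lower() for s in finetuned_preds[:n]]
--     rn = [s.strip().lower() for s in references[:n]]
--     f_ok = sum(f == r for f, r in zip(fn, rn))
--     b_ok = sum(b == r for b, r in zip(bn, rn))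
--     both = sum(b == r and f == r for b, f, r in zip(bn, fn, rn))
--     wins = f_ok - both
--     losses = b_ok - both
--     return wins, losses, n - wins - losses
-- ===== Notes on version B (the rewrite author's own statement) =====
-- stated objective: alternative
-- what changed: Replaces the per-element 3-way classification loop by inclusion-exclusion: normalize the (truncated) lists once, count finetuned-correct, baseline-correct and both-correct in staged passes, then derive wins = f_ok - both, losses = b_ok - both and ties as the remainder arithmetically.
import Mathlib
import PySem

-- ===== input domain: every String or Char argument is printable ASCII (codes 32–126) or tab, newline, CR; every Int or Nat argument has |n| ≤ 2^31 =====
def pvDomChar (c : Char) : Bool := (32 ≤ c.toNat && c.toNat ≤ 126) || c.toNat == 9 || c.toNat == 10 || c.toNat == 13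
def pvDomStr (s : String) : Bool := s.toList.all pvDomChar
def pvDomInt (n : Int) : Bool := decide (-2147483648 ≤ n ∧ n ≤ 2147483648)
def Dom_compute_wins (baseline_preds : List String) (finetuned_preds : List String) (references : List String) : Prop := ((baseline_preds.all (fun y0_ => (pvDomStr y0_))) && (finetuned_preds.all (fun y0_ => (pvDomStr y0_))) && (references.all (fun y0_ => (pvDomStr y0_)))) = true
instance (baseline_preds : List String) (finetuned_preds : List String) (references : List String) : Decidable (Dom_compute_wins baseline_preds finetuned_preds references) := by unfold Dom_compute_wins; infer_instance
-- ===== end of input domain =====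

-- B replaces A's 3-way classification loop by inclusion-exclusion over staged correctness
-- counts (same O(n) cost, different decomposition); return values are proved equal.

-- ===== PORT A =====
-- strip().lower() normalisation
def cwNorm (s : String) : String := PySem.Str.lower (PySem.Str.strip s)

-- literal loop of A: fold over zip(baseline, finetuned, references) with (wins, losses, ties)
def cwGoA : List String → List String → List String → Int → Int → Int → Int × Int × Int
  | bp :: bs, fp :: fs, ref :: rs, wins, losses, ties =>
    let b_correct := cwNorm bp == cwNorm ref
    let f_correct := cwNorm fp == cwNorm ref
    if f_correct && !b_correct then cwGoA bs fs rs (wins + 1) losses ties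
    else if b_correct && !f_correct then cwGoA bs fs rs wins (losses + 1) ties
    else cwGoA bs fs rs wins losses (ties + 1)
  | _, _, _, wins, losses, ties => (wins, losses, ties)

def compute_wins (baseline_preds : List String) (finetuned_preds : List String) (references : List String) : Int × Int × Int :=
  cwGoA baseline_preds finetuned_preds references 0 0 0

-- ===== PORT B =====
-- sum(x == y for x, y in zip(xs, ys))
def cwCountEq : List String → List String → Int
  | x :: xs, y :: ys => (if x == y then 1 else 0) + cwCountEq xs ys
  | _, _ => 0

-- sum(b == r and f == r for b, f, r in zip(bn, fn, rn))
def cwCountBoth : List String → List String → List String → Int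
  | b :: bs, f :: fs, r :: rs => (if b == r && f == r then 1 else 0) + cwCountBoth bs fs rs
  | _, _, _ => 0

def compute_wins_alt (baseline_preds : List String) (finetuned_preds : List String) (references : List String) : Int × Int × Int :=
  -- n = min of the three lengths; xs[:n] with 0 ≤ n ≤ len xs is exactly List.take n
  let n := min baseline_preds.length (min finetuned_preds.length references.length)
  let bn := (baseline_preds.take n).map cwNorm
  let fn := (finetuned_preds.take n).map cwNorm
  let rn := (references.take n).map cwNorm
  let f_ok := cwCountEq fn rn
  let b_ok := cwCountEq bn rn
  let both := cwCountBoth bn fn rn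
  let wins := f_ok - both
  let losses := b_ok - both
  (wins, losses, (n : Int) - wins - losses)

-- ===== PRECONDITION & SPEC =====
def Spec_compute_wins (baseline_preds : List String) (finetuned_preds : List String) (references : List String) (out : Int × Int × Int) : Prop := out = compute_wins_alt baseline_preds finetuned_preds references
instance (baseline_preds : List String) (finetuned_preds : List String) (references : List String) (out : Int × Int × Int) : Decidable (Spec_compute_wins baseline_preds finetuned_preds references out) := by unfold Spec_compute_wins; infer_instance

-- ===== CLAIM (what is proved, stated in full; the proofs are below) =====
def Claim_equal_compute_wins : Prop := ∀ (baseline_preds : List String) (finetuned_preds : List String) (references : List String), Dom_compute_wins baseline_preds finetuned_preds references → Spec_compute_wins baseline_preds finetuned_preds references (compute_wins baseline_preds finetuned_preds references)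

-- ===== LEMMAS AND PROOFS =====
lemma cwGoA_eq (bs fs rs : List String) :
    ∀ (w l t : Int),
      cwGoA bs fs rs w l t =
        (let n := min bs.length (min fs.length rs.length)
         let bn := (bs.take n).map cwNorm
         let fn := (fs.take n).map cwNorm
         let rn := (rs.take n).map cwNorm
         (w + (cwCountEq fn rn - cwCountBoth bn fn rn),
          l + (cwCountEq bn rn - cwCountBoth bn fn rn),
          t + (n : Int) - (cwCountEq fn rn - cwCountBoth bn fn rn)
            - (cwCountEq bn rn - cwCountBoth bn fn rn))) := by
  induction bs generalizing fs rs with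
  | nil => intro w l t; simp [cwGoA, cwCountEq, cwCountBoth]
  | cons bp bs ih =>
    intro w l t
    match fs, rs with
    | [], _ => simp [cwGoA, cwCountEq, cwCountBoth]
    | _ :: _, [] => simp [cwGoA, cwCountEq, cwCountBoth]
    | fp :: fs, ref :: rs =>
      simp only [cwGoA, List.length_cons, Nat.succ_min_succ,
        List.take_succ_cons, List.map_cons]
      by_cases hf : (cwNorm fp == cwNorm ref) = true <;>
        by_cases hb : (cwNorm bp == cwNorm ref) = true <;>
        simp only [hf, hb, Bool.not_true, Bool.not_false, Bool.and_true, Bool.and_false,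
          reduceIte] <;>
        simp only [ih] <;>
        simp only [cwCountEq, cwCountBoth, hf, hb, Bool.and_true, Bool.and_false,
          Bool.true_and, Bool.false_and, reduceIte] <;>
        refine Prod.ext ?_ (Prod.ext ?_ ?_) <;> push_cast <;> ring

-- ===== VERDICT (by name: the statement is the Claim_ definition above) =====
theorem compute_wins_spec : Claim_equal_compute_wins := by
  intro bs fs rs _
  unfold Spec_compute_wins compute_wins compute_wins_alt
  rw [cwGoA_eq]
  simp
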